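-- pv_equiv track=rewrite | github.com/Saucedo-Gonzalo/INFORMATORIO | ESTRUCTURAS DE CONTROL/FUNCIONES/COMPLEMENTARIOS/complementario08.py | prim_mayus
-- ===== SOURCE A (Python) =====
-- def prim_mayus (cadena):
--     cont=0
--     sal=''
--     for i in(cadena):
--         if i.isalpha() and cont==0:
--             sal =sal + i.upper()
--             cont=1
--         else:
--             sal=sal+ i
--      #si ocupo capitalize() no cubre el caso en el que tenga por ej, ¿hola? hace mayus el ¿ y no la h.
--     return sal
-- ===== SOURCE B (Python) =====
-- def prim_mayus(cadena):
--     for i, ch in enumerate(cadena):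
--         if ch.isalpha():
--             return cadena[:i] + ch.upper() + cadena[i+1:]
--     return cadena
-- ===== Notes on version B (the rewrite author's own statement) =====
-- stated objective: simpler
-- what changed: Replaces A's accumulator-with-flag pass over every character by an early-return scan for the first alphabetic index followed by one slice-based reconstruction, avoiding per-character string concatenation.
import Mathlib
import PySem

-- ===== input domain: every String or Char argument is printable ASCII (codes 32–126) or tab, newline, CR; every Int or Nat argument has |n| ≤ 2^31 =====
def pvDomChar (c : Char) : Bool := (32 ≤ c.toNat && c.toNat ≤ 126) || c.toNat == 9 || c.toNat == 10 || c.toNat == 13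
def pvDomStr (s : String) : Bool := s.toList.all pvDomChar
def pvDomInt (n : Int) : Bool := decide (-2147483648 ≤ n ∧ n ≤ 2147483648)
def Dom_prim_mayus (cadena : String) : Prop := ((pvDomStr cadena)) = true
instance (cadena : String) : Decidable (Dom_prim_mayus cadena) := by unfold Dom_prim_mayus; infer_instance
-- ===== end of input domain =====

-- B uppercases the first alphabetic character via an early-return index scan and slices,
-- instead of A's flag-carrying accumulator pass; objective: simpler.

-- ===== PORT A =====
-- A's for-loop over the characters with state (cont, sal), as structural recursion
def pvAGo : List Char → Nat → List Char → List Char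
  | [], _, sal => sal
  | c :: rest, cont, sal =>
      if PySem.Chars.isalpha c && cont == 0 then
        pvAGo rest 1 (sal ++ [PySem.Chars.upperChar c])
      else
        pvAGo rest cont (sal ++ [c])

def prim_mayus (cadena : String) : String :=
  String.ofList (pvAGo cadena.toList 0 [])

-- ===== PORT B =====
-- Source B's `for i, ch in enumerate(cadena)` with early return, as recursion over the enumerate list
def pvBGo (s : List Char) : List (Int × Char) → List Char
  | [] => s
  | (i, ch) :: rest =>
      if PySem.Chars.isalpha ch then
        PySem.List.slice s none (some i) ++ [PySem.Chars.upperChar ch] ++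
          PySem.List.slice s (some (i + 1)) none
      else
        pvBGo s rest

def prim_mayus_alt (cadena : String) : String :=
  String.ofList (pvBGo cadena.toList (PySem.List.enumerate cadena.toList 0))

-- ===== PRECONDITION & SPEC =====
def Spec_prim_mayus (cadena : String) (out : String) : Prop := out = prim_mayus_alt cadena
instance (cadena : String) (out : String) : Decidable (Spec_prim_mayus cadena out) := by unfold Spec_prim_mayus; infer_instance

-- ===== CLAIM (what is proved, stated in full; the proofs are below) =====
def Claim_equal_prim_mayus : Prop := ∀ (cadena : String), Dom_prim_mayus cadena → Spec_prim_mayus cadena (prim_mayus cadena)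

-- ===== LEMMAS AND PROOFS =====

-- common simple form: uppercase the first alphabetic character
def pvSimple : List Char → List Char
  | [] => []
  | c :: rest =>
      if PySem.Chars.isalpha c then PySem.Chars.upperChar c :: rest
      else c :: pvSimple rest

theorem pvAGo_one (s sal : List Char) : pvAGo s 1 sal = sal ++ s := by
  induction s generalizing sal with
  | nil => simp [pvAGo]
  | cons c rest ih => simp [pvAGo, ih]

theorem pvAGo_zero (s sal : List Char) : pvAGo s 0 sal = sal ++ pvSimple s := by
  induction s generalizing sal with
  | nil => simp [pvAGo, pvSimple]
  | cons c rest ih =>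
    by_cases h : PySem.Chars.isalpha c
    · simp [pvAGo, pvSimple, h, pvAGo_one]
    · simp [pvAGo, pvSimple, h, ih]

theorem pvBGo_eq (s p : List Char) :
    pvBGo (p ++ s) (PySem.List.enumerate s (p.length : Int)) = p ++ pvSimple s := by
  induction s generalizing p with
  | nil => simp [PySem.List.enumerate_nil, pvBGo, pvSimple]
  | cons c rest ih =>
    rw [PySem.List.enumerate_cons]
    by_cases h : PySem.Chars.isalpha c
    · have h1 : ((p.length : Int) + 1) = ((p.length + 1 : Nat) : Int) := by push_cast; ring
      simp only [pvBGo, h, if_pos, pvSimple, h1,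
        PySem.List.slice_to_natCast, PySem.List.slice_from_natCast]
      simp [List.drop_append]
    · have h2 : ((p.length : Int) + 1) = (((p ++ [c]).length : Nat) : Int) := by simp
      simp only [pvBGo, h]
      rw [show pvSimple (c :: rest) = c :: pvSimple rest from by simp [pvSimple, h], h2]
      simpa [List.append_assoc] using ih (p ++ [c])

theorem prim_mayus_spec : Claim_equal_prim_mayus := by
  intro cadena _
  unfold Spec_prim_mayus prim_mayus prim_mayus_alt
  have hb := pvBGo_eq cadena.toList []
  simp only [List.nil_append, List.length_nil, Nat.cast_zero] at hb
  rw [hb, pvAGo_zero]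
  simp
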